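-- pv_equiv track=rewrite | github.com/bssrdf/pyleet | S/SecondMinimumTimetoReachDestination.py | secondMinimum2
-- ===== SOURCE A (Python) =====
-- from typing import List
-- from collections import deque, defaultdict
--
-- def secondMinimum2(n: int, edges: List[List[int]], time: int, change: int) -> int:
--     que, graph = deque(), defaultdict(list)
--     visited = [[False]*2 for _ in range(n+1)]
--     curTime, firstArrive = 0, -1
--     for u, v in edges:
--         graph[u].append(v)
--         graph[v].append(u)
--     que.append((1, curTime))
--     visited[1][0] = True
--     while que:
--         u, cur = que.popleft()
--         if u == n:
--             if firstArrive == -1: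
--                 firstArrive = cur
--             elif cur > firstArrive:
--                 return cur
--             #else: return cur
--         for v in graph[u]:
--             redLight = (cur // change) % 2
--             arrivalTime = cur + time
--             if redLight: arrivalTime += change - (cur % change)
--             if not visited[v][0]:
--                 visited[v][0] = True
--                 que.append((v, arrivalTime))
--             elif not visited[v][1]:
--                 visited[v][1] = True
--                 que.append((v, arrivalTime))
--     return -1
-- ===== SOURCE B (Python) =====
-- # Layer-synchronous BFS: instead of a deque of (node, time) pairs and a
-- # visited[n+1][2] boolean matrix, advance a whole frontier list per step with one
-- # scalar clock (all queue entries of a layer share the same arrival time) and an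
-- # int enqueue counter (0..2) per node.
-- from collections import defaultdict
--
-- def secondMinimum2(n, edges, time, change):
--     adj = defaultdict(list)
--     for u, v in edges:
--         adj[u].append(v)
--         adj[v].append(u)
--     cnt = [0] * (n + 1)
--     cnt[1] = 1
--     frontier = [1]
--     t = 0
--     firstArrive = -1
--     while frontier:
--         for u in frontier:
--             if u == n:
--                 if firstArrive == -1:
--                     firstArrive = t
--                 elif t > firstArrive:
--                     return t
--         nt = t + time
--         if (t // change) % 2:
--             nt += change - t % change
--         nxt = []
--         for u in frontier:
--             for v in adj[u]:
--                 if cnt[v] < 2: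
--                     cnt[v] += 1
--                     nxt.append(v)
--         frontier = nxt
--         t = nt
--     return -1
-- ===== Notes on version B (the rewrite author's own statement) =====
-- stated objective: alternative
-- what changed: Replaces the deque of (node,time) pairs plus the visited[n+1][2] boolean matrix by a layer-synchronous BFS: whole frontier lists advanced step by step, one scalar clock per layer (all queue entries of a layer share the same arrival time) and a per-node int enqueue counter.
-- outside the precondition, e.g. on secondMinimum2(2, [], 0, 0): A returns -1, B raises ZeroDivisionError; on secondMinimum2(2, [[1, -1]], 3, 2): A returns -1, B returns -1; on secondMinimum2(3, [[1, 2], [0, 5]], 1, 2): A returns -1, B returns -1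
import Mathlib
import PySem

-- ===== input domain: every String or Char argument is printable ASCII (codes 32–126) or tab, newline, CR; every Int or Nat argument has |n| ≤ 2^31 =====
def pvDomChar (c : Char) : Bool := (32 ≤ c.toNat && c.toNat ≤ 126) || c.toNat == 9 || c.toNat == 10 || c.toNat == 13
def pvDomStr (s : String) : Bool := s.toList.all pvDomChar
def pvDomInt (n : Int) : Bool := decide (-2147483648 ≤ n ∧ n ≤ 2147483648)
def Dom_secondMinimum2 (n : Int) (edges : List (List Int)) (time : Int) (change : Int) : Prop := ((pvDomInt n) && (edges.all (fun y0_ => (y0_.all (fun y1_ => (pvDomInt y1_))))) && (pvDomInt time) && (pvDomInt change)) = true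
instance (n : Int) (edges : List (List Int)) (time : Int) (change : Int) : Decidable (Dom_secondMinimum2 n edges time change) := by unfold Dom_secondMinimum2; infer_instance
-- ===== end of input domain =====

-- B replaces A's FIFO deque of (node,time) pairs + visited[n+1][2] matrix by a
-- layer-synchronous BFS (whole frontier per step, one scalar clock per layer, int
-- enqueue counters over list adjacency); same return value on every Pre_ input.

-- ===== PORT A =====
-- Port of A: FIFO BFS with a deque of (node, time) pairs and a visited[n+1][2]
-- matrix of booleans.  Where Python indexing would raise (only outside Pre_) the
-- port skips the access; exact on all inputs where A returns.

-- termination helpers, cited by name in the decreasing_by proofs of the loops below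
theorem pvSumMapSet {α : Type} (f : α → Nat) :
    ∀ (l : List α) (j : Nat) (x : α) (hj : j < l.length),
      ((l.set j x).map f).sum + f (l[j]'hj) = (l.map f).sum + f x := by
  intro l
  induction l with
  | nil => intro j x hj; simp at hj
  | cons a l ih =>
    intro j x hj
    cases j with
    | zero => simp [List.set]; omega
    | succ j =>
      simp only [List.set, List.map, List.sum_cons, List.getElem_cons_succ]
      have := ih j x (by simpa using hj)
      omega

theorem pvGetSet {α : Type} (xs : List α) (i : Int) (x : α)
    (h : PySem.List.pyGet? xs i = some x) :
    ∃ j, ∃ hj : j < xs.length, xs[j]'hj = x ∧ ∀ y, PySem.List.pySetD xs i y = xs.set j y := by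
  simp only [PySem.List.pyGet?, PySem.List.pyIdx?] at h
  split_ifs at h with h1 h2 h3
  · refine ⟨i.toNat, ?_⟩
    simp only [Option.bind_some] at h
    rw [List.getElem?_eq_some_iff] at h
    obtain ⟨hj, hx⟩ := h
    refine ⟨hj, hx, ?_⟩
    intro y
    simp [PySem.List.pySetD, PySem.List.pySet?, PySem.List.pyIdx?, h1, h2]
  · simp at h
  · refine ⟨xs.length - (-i).toNat, ?_⟩
    simp only [Option.bind_some] at h
    rw [List.getElem?_eq_some_iff] at h
    obtain ⟨hj, hx⟩ := h
    refine ⟨hj, hx, ?_⟩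
    intro y
    simp [PySem.List.pySetD, PySem.List.pySet?, PySem.List.pyIdx?, h1, h3]
  · simp at h

def pvFreeVis (vis : List (List Bool)) : Nat := (vis.map (fun r => r.count false)).sum

theorem pvCountSetTrue (row : List Bool) (i : Int) (h : PySem.List.pyGet? row i = some false) :
    (PySem.List.pySetD row i true).count false + 1 = row.count false := by
  obtain ⟨j, hj, hv, hset⟩ := pvGetSet row i false h
  rw [hset true]
  have h1 := pvSumMapSet (fun b : Bool => if b then 0 else 1) row j true hj
  have hc : ∀ (l : List Bool), l.count false = ((l.map (fun b : Bool => if b then 0 else 1)).sum) := by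
    intro l; induction l with
    | nil => simp
    | cons a l ih =>
      cases a <;> simp [ih] <;> omega
  rw [hc, hc]
  rw [hv] at h1
  simpa using h1

def pvVisitA (time change cur : Int) (st : List (List Bool) × List (Int × Int)) (v : Int) :
    List (List Bool) × List (Int × Int) :=
  let redLight := PySem.Int.mod (PySem.Int.floordiv cur change) 2
  let arrivalTime := cur + time
  let arrivalTime := if redLight ≠ 0 then arrivalTime + (change - PySem.Int.mod cur change) else arrivalTime
  match PySem.List.pyGet? st.1 v with
  | none => st   -- Python: IndexError (outside Pre_)
  | some row =>
    match PySem.List.pyGet? row 0 with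
    | none => st
    | some b0 =>
      if b0 = false then
        (PySem.List.pySetD st.1 v (PySem.List.pySetD row 0 true), st.2 ++ [(v, arrivalTime)])
      else
        match PySem.List.pyGet? row 1 with
        | none => st
        | some b1 =>
          if b1 = false then
            (PySem.List.pySetD st.1 v (PySem.List.pySetD row 1 true), st.2 ++ [(v, arrivalTime)])
          else st

def pvExpandA (time change cur : Int) (nbrs : List Int)
    (vis : List (List Bool)) (que : List (Int × Int)) : List (List Bool) × List (Int × Int) :=
  nbrs.foldl (pvVisitA time change cur) (vis, que)

theorem pvVisitA_measure (time change cur : Int) (st : List (List Bool) × List (Int × Int)) (v : Int) :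
    2 * pvFreeVis (pvVisitA time change cur st v).1 + (pvVisitA time change cur st v).2.length
      ≤ 2 * pvFreeVis st.1 + st.2.length := by
  obtain ⟨vis, que⟩ := st
  unfold pvVisitA
  cases hrow : PySem.List.pyGet? vis v with
  | none => simp
  | some row =>
    simp only
    cases hb0 : PySem.List.pyGet? row 0 with
    | none => simp
    | some b0 =>
      simp only
      by_cases h0 : b0 = false
      · subst h0
        rw [if_pos rfl]
        obtain ⟨j, hj, hv, hset⟩ := pvGetSet vis v row hrow
        rw [hset]
        have hcnt := pvCountSetTrue row 0 hb0
        have hs := pvSumMapSet (fun r : List Bool => r.count false) vis j (PySem.List.pySetD row 0 true) hj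
        rw [hv] at hs
        simp only [pvFreeVis, List.length_append, List.length_cons, List.length_nil]
        omega
      · simp only [if_neg h0]
        cases hb1 : PySem.List.pyGet? row 1 with
        | none => simp
        | some b1 =>
          simp only
          by_cases h1 : b1 = false
          · subst h1
            rw [if_pos rfl]
            obtain ⟨j, hj, hv, hset⟩ := pvGetSet vis v row hrow
            rw [hset]
            have hcnt := pvCountSetTrue row 1 hb1
            have hs := pvSumMapSet (fun r : List Bool => r.count false) vis j (PySem.List.pySetD row 1 true) hj
            rw [hv] at hs
            simp only [pvFreeVis, List.length_append, List.length_cons, List.length_nil]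
            omega
          · simp [h1]

theorem pvExpandA_measure (time change cur : Int) (nbrs : List Int) :
    ∀ (vis : List (List Bool)) (que : List (Int × Int)),
      2 * pvFreeVis (pvExpandA time change cur nbrs vis que).1
        + (pvExpandA time change cur nbrs vis que).2.length
      ≤ 2 * pvFreeVis vis + que.length := by
  induction nbrs with
  | nil => intro vis que; simp [pvExpandA]
  | cons v r ih =>
    intro vis que
    have h1 := pvVisitA_measure time change cur (vis, que) v
    have h2 := ih (pvVisitA time change cur (vis, que) v).1 (pvVisitA time change cur (vis, que) v).2
    simp only [pvExpandA, List.foldl_cons] at *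
    rw [Prod.mk.eta] at h2
    omega

def pvLoopA (graph : PySem.Dict Int (List Int)) (nn time change : Int)
    (vis : List (List Bool)) (que : List (Int × Int)) (firstArrive : Int) : Int :=
  match que with
  | [] => -1
  | (u, cur) :: rest =>
    if u = nn ∧ firstArrive ≠ -1 ∧ cur > firstArrive then cur
    else
      let fa' := if u = nn ∧ firstArrive = -1 then cur else firstArrive
      let st := pvExpandA time change cur (graph.getD u []) vis rest
      pvLoopA graph nn time change st.1 st.2 fa'
termination_by 2 * pvFreeVis vis + que.length
decreasing_by
  have h := pvExpandA_measure time change cur (graph.getD u []) vis rest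
  simp only [List.length_cons]
  omega

def pvAddEdgeA (g : PySem.Dict Int (List Int)) (e : List Int) : PySem.Dict Int (List Int) :=
  match e with
  | [u, v] =>
    let g1 := g.insert u (g.getD u [] ++ [v])
    g1.insert v (g1.getD v [] ++ [u])
  | _ => g   -- Python: ValueError on unpack (outside Pre_)

def pvBuildGraphA (edges : List (List Int)) : PySem.Dict Int (List Int) :=
  edges.foldl pvAddEdgeA PySem.Dict.empty

def secondMinimum2 (n : Int) (edges : List (List Int)) (time : Int) (change : Int) : Int :=
  let graph := pvBuildGraphA edges
  let visited := List.replicate (n + 1).toNat (List.replicate 2 false)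
  let visited :=
    match PySem.List.pyGet? visited 1 with
    | none => visited   -- Python: IndexError (outside Pre_)
    | some row => PySem.List.pySetD visited 1 (PySem.List.pySetD row 0 true)
  pvLoopA graph n time change visited [(1, 0)] (-1)

-- ===== PORT B =====
-- Port of B: layer-synchronous BFS; frontier lists, one scalar clock per layer,
-- an int enqueue counter per node, defaultdict adjacency.

def pvStepB (st : List Int × List Int) (v : Int) : List Int × List Int :=
  match PySem.List.pyGet? st.1 v with
  | none => st   -- Python: IndexError (outside Pre_)
  | some c => if c < 2 then (PySem.List.pySetD st.1 v (c + 1), st.2 ++ [v]) else st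

def pvVisitB (adj : PySem.Dict Int (List Int)) (st : List Int × List Int) (u : Int) :
    List Int × List Int :=
  (adj.getD u []).foldl pvStepB st

def pvExpandB (adj : PySem.Dict Int (List Int)) (frontier : List Int) (cnt : List Int) :
    List Int × List Int :=
  frontier.foldl (pvVisitB adj) (cnt, ([] : List Int))

def pvFreeCnt (cnt : List Int) : Nat := (cnt.map (fun c => (2 - c).toNat)).sum

theorem pvStepB_measure (st : List Int × List Int) (v : Int) :
    2 * pvFreeCnt (pvStepB st v).1 + (pvStepB st v).2.length
      ≤ 2 * pvFreeCnt st.1 + st.2.length := by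
  obtain ⟨cnt, nxt⟩ := st
  unfold pvStepB
  cases hc : PySem.List.pyGet? cnt v with
  | none => simp
  | some c =>
    simp only
    by_cases h2 : c < 2
    · simp only [if_pos h2]
      obtain ⟨j, hj, hv, hset⟩ := pvGetSet cnt v c hc
      rw [hset]
      have hs := pvSumMapSet (fun c : Int => (2 - c).toNat) cnt j (c + 1) hj
      rw [hv] at hs
      simp only [pvFreeCnt, List.length_append, List.length_cons, List.length_nil]
      omega
    · simp [h2]

theorem pvStepB_fold_measure : ∀ (r : List Int) (st : List Int × List Int),
    2 * pvFreeCnt (List.foldl pvStepB st r).1 + (List.foldl pvStepB st r).2.length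
      ≤ 2 * pvFreeCnt st.1 + st.2.length := by
  intro r
  induction r with
  | nil => intro st; simp
  | cons v r ih =>
    intro st
    simp only [List.foldl_cons]
    exact le_trans (ih (pvStepB st v)) (pvStepB_measure st v)

theorem pvVisitB_measure (adj : PySem.Dict Int (List Int)) (st : List Int × List Int) (u : Int) :
    2 * pvFreeCnt (pvVisitB adj st u).1 + (pvVisitB adj st u).2.length
      ≤ 2 * pvFreeCnt st.1 + st.2.length := by
  unfold pvVisitB
  exact pvStepB_fold_measure (adj.getD u []) st

theorem pvExpandB_measure (adj : PySem.Dict Int (List Int)) (frontier : List Int) :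
    ∀ (cnt nxt : List Int),
      2 * pvFreeCnt (frontier.foldl (pvVisitB adj) (cnt, nxt)).1
        + (frontier.foldl (pvVisitB adj) (cnt, nxt)).2.length
      ≤ 2 * pvFreeCnt cnt + nxt.length := by
  induction frontier with
  | nil => intro cnt nxt; simp
  | cons u r ih =>
    intro cnt nxt
    have h1 := pvVisitB_measure adj (cnt, nxt) u
    have h2 := ih (pvVisitB adj (cnt, nxt) u).1 (pvVisitB adj (cnt, nxt) u).2
    simp only [List.foldl_cons] at *
    rw [Prod.mk.eta] at h2
    omega

def pvScanStep (nn t : Int) (st : Option Int × Int) (u : Int) : Option Int × Int :=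
  match st with
  | (some r, f) => (some r, f)
  | (none, f) =>
    if u = nn then
      if f = -1 then (none, t)
      else if t > f then (some t, f)
      else (none, f)
    else (none, f)

def pvScanB (nn t : Int) (frontier : List Int) (fa : Int) : Option Int × Int :=
  frontier.foldl (pvScanStep nn t) (none, fa)

def pvNextB (time change t : Int) : Int :=
  let nt := t + time
  if PySem.Int.mod (PySem.Int.floordiv t change) 2 ≠ 0 then nt + (change - PySem.Int.mod t change) else nt

def pvLoopB (adj : PySem.Dict Int (List Int)) (nn time change : Int)
    (cnt : List Int) (frontier : List Int) (t fa : Int) : Int :=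
  match frontier with
  | [] => -1
  | _ :: _ =>
    match pvScanB nn t frontier fa with
    | (some r, _) => r
    | (none, fa') =>
      let st := pvExpandB adj frontier cnt
      pvLoopB adj nn time change st.1 st.2 (pvNextB time change t) fa'
termination_by 2 * pvFreeCnt cnt + frontier.length
decreasing_by
  have h := pvExpandB_measure adj frontier cnt []
  simp only [pvExpandB]
  simp only [List.length_cons, List.length_nil] at *
  omega

-- B's adjacency-building loop is line for line the one A uses (defaultdict of
-- neighbour lists), so its port reuses pvBuildGraphA for that step.
def secondMinimum2_alt (n : Int) (edges : List (List Int)) (time : Int) (change : Int) : Int :=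
  let adj := pvBuildGraphA edges
  let cnt := List.replicate (n + 1).toNat (0 : Int)
  let cnt := PySem.List.pySetD cnt 1 1
  pvLoopB adj n time change cnt [1] 0 (-1)

-- ===== PRECONDITION & SPEC =====
-- Pre_ keeps the natural domain of the task — n ≥ 1, change ≠ 0, every edge a pair,
-- and either all node labels in 0..n or a graph that never mentions the start node 1
-- (where both programs just return -1); outside it A raises (n < 1, a malformed
-- edge, a reached label beyond n, change = 0 once a neighbour is scanned — while B's
-- per-layer clock divides by change even on a dead frontier) or returns through its
-- negative-index wraparound, an accident of the visited matrix the claim does not cover.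
def Pre_secondMinimum2 (n : Int) (edges : List (List Int)) (time : Int) (change : Int) : Prop :=
  1 ≤ n ∧ change ≠ 0 ∧ (∀ e ∈ edges, e.length = 2) ∧
    ((∀ e ∈ edges, ∀ x ∈ e, 0 ≤ x ∧ x ≤ n) ∨ (∀ e ∈ edges, ∀ x ∈ e, x ≠ 1))
instance (n : Int) (edges : List (List Int)) (time : Int) (change : Int) :
    Decidable (Pre_secondMinimum2 n edges time change) := by
  unfold Pre_secondMinimum2; infer_instance

def pvWitness_secondMinimum2 : Int × List (List Int) × Int × Int := (3, [[1, 2], [2, 3]], 5, 4)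

def Spec_secondMinimum2 (n : Int) (edges : List (List Int)) (time : Int) (change : Int) (out : Int) : Prop := out = secondMinimum2_alt n edges time change
instance (n : Int) (edges : List (List Int)) (time : Int) (change : Int) (out : Int) : Decidable (Spec_secondMinimum2 n edges time change out) := by unfold Spec_secondMinimum2; infer_instance

-- ===== CLAIM (what is proved, stated in full; the proofs are below) =====
def Claim_equal_secondMinimum2 : Prop := ∀ (n : Int) (edges : List (List Int)) (time : Int) (change : Int), Dom_secondMinimum2 n edges time change → Pre_secondMinimum2 n edges time change → Spec_secondMinimum2 n edges time change (secondMinimum2 n edges time change)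

-- ===== LEMMAS AND PROOFS =====

-- relation between A's visited matrix and B's counters
def pvRel (nn : Int) (vis : List (List Bool)) (cnt : List Int) : Prop :=
  vis.length = cnt.length ∧ cnt.length = (nn + 1).toNat ∧
  ∀ j, j < cnt.length →
    0 ≤ cnt.getD j 0 ∧
    vis.getD j [] = [decide (1 ≤ cnt.getD j 0), decide (2 ≤ cnt.getD j 0)]

-- abstract "which offers are accepted" function shared by both expansions
def pvBump : List Int → List Int → List Int × List Int
  | cnt, [] => (cnt, [])
  | cnt, v :: r =>
    match PySem.List.pyGet? cnt v with
    | none => pvBump cnt r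
    | some c =>
      if c < 2 then
        let p := pvBump (PySem.List.pySetD cnt v (c + 1)) r
        (p.1, v :: p.2)
      else pvBump cnt r

def pvExpandBFrom (adj : PySem.Dict Int (List Int)) (F : List Int) (cnt : List Int)
    (N : List Int) : List Int × List Int :=
  F.foldl (pvVisitB adj) (cnt, N)

theorem pvGetDSet {α : Type} : ∀ (l : List α) (i j : Nat) (x d : α),
    (l.set i x).getD j d = if i = j ∧ j < l.length then x else l.getD j d := by
  intro l
  induction l with
  | nil => intro i j x d; simp
  | cons a l ih =>
    intro i j x d
    cases i with
    | zero =>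
      cases j with
      | zero => simp
      | succ j => simp
    | succ i =>
      cases j with
      | zero => simp
      | succ j =>
        simp only [List.set_cons_succ, List.getD_cons_succ, ih i j x d]
        by_cases h : i = j ∧ j < l.length
        · rw [if_pos h, if_pos ⟨by omega, by simp; omega⟩]
        · rw [if_neg h, if_neg (by rintro ⟨h1, h2⟩; simp at h2; exact h ⟨by omega, by omega⟩)]

theorem pvPyGetIn {α : Type} (l : List α) (v : Int) (d : α) (h0 : 0 ≤ v)
    (hl : v.toNat < l.length) :
    PySem.List.pyGet? l v = some (l.getD v.toNat d) := by
  have hv : v < (l.length : Int) := by omega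
  simp only [PySem.List.pyGet?, PySem.List.pyIdx?, if_pos h0, if_pos hv]
  simp [List.getElem?_eq_getElem hl, List.getD_eq_getElem l d hl]

theorem pvStepB_fold_eq_bump : ∀ (nbrs cnt M : List Int),
    nbrs.foldl pvStepB (cnt, M) = ((pvBump cnt nbrs).1, M ++ (pvBump cnt nbrs).2) := by
  intro nbrs
  induction nbrs with
  | nil => intro cnt M; simp [pvBump]
  | cons v r ih =>
    intro cnt M
    cases hc : PySem.List.pyGet? cnt v with
    | none => simp [pvBump, hc, pvStepB, List.foldl_cons, ih cnt M]
    | some c =>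
      by_cases h2 : c < 2
      · simp [pvBump, hc, h2, pvStepB, List.foldl_cons,
          ih (PySem.List.pySetD cnt v (c + 1)) (M ++ [v])]
      · simp [pvBump, hc, h2, pvStepB, List.foldl_cons, ih cnt M]

theorem pvBump_measure : ∀ (nbrs cnt : List Int),
    pvFreeCnt (pvBump cnt nbrs).1 + (pvBump cnt nbrs).2.length = pvFreeCnt cnt := by
  intro nbrs
  induction nbrs with
  | nil => intro cnt; simp [pvBump]
  | cons v r ih =>
    intro cnt
    cases hc : PySem.List.pyGet? cnt v with
    | none => simp [pvBump, hc, ih cnt]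
    | some c =>
      by_cases h2 : c < 2
      · obtain ⟨j, hj, hv, hset⟩ := pvGetSet cnt v c hc
        have hs := pvSumMapSet (fun c : Int => (2 - c).toNat) cnt j (c + 1) hj
        rw [hv] at hs
        have hih := ih (PySem.List.pySetD cnt v (c + 1))
        rw [hset] at hih
        simp only [pvBump, hc, if_pos h2, List.length_cons]
        rw [hset]
        simp only [pvFreeCnt] at *
        omega
      · simp [pvBump, hc, h2, ih cnt]

theorem pvScan_absorb (nn t : Int) : ∀ (F : List Int) (r : Int) (x : Int),
    F.foldl (pvScanStep nn t) (some r, x) = (some r, x) := by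
  intro F
  induction F with
  | nil => intro r x; rfl
  | cons u F ih =>
    intro r x
    simp only [List.foldl_cons]
    exact ih r x

-- one-step unfoldings of the two loops
theorem pvLoopA_nil (graph : PySem.Dict Int (List Int)) (nn time change : Int)
    (vis : List (List Bool)) (fa : Int) :
    pvLoopA graph nn time change vis [] fa = -1 := by
  rw [pvLoopA.eq_def]

theorem pvLoopA_cons (graph : PySem.Dict Int (List Int)) (nn time change : Int)
    (vis : List (List Bool)) (u cur : Int) (rest : List (Int × Int)) (fa : Int) :
    pvLoopA graph nn time change vis ((u, cur) :: rest) fa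
      = if u = nn ∧ fa ≠ -1 ∧ cur > fa then cur
        else
          pvLoopA graph nn time change
            (pvExpandA time change cur (graph.getD u []) vis rest).1
            (pvExpandA time change cur (graph.getD u []) vis rest).2
            (if u = nn ∧ fa = -1 then cur else fa) := by
  rw [pvLoopA.eq_def]

theorem pvLoopB_nil (adj : PySem.Dict Int (List Int)) (nn time change : Int)
    (cnt : List Int) (t fa : Int) :
    pvLoopB adj nn time change cnt [] t fa = -1 := by
  rw [pvLoopB.eq_def]

theorem pvLoopB_cons (adj : PySem.Dict Int (List Int)) (nn time change : Int)
    (cnt : List Int) (u : Int) (rest : List Int) (t fa : Int) :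
    pvLoopB adj nn time change cnt (u :: rest) t fa
      = (match pvScanB nn t (u :: rest) fa with
         | (some r, _) => r
         | (none, fa') =>
           pvLoopB adj nn time change (pvExpandB adj (u :: rest) cnt).1
             (pvExpandB adj (u :: rest) cnt).2 (pvNextB time change t) fa') := by
  rw [pvLoopB.eq_def]

-- A's expansion of one node mirrors pvBump on the counters
theorem pvExpandA_eq_bump (nn time change t : Int) :
    ∀ (nbrs : List Int) (vis : List (List Bool)) (cnt : List Int) (q : List (Int × Int)),
      pvRel nn vis cnt → (∀ v ∈ nbrs, 0 ≤ v ∧ v ≤ nn) →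
      pvRel nn (pvExpandA time change t nbrs vis q).1 (pvBump cnt nbrs).1 ∧
      (pvExpandA time change t nbrs vis q).2
        = q ++ ((pvBump cnt nbrs).2.map (fun v => (v, pvNextB time change t))) := by
  intro nbrs
  induction nbrs with
  | nil =>
    intro vis cnt q hrel _
    exact ⟨by simpa [pvExpandA, pvBump] using hrel, by simp [pvExpandA, pvBump]⟩
  | cons v r ih =>
    intro vis cnt q hrel hrange
    obtain ⟨hv0, hvn⟩ := hrange v List.mem_cons_self
    have hrange' : ∀ w ∈ r, 0 ≤ w ∧ w ≤ nn := fun w hw => hrange w (List.mem_cons_of_mem _ hw)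
    obtain ⟨hlen, hlenc, hj⟩ := hrel
    have hvt : v.toNat < cnt.length := by omega
    have hvtv : v.toNat < vis.length := by omega
    obtain ⟨hc0, hrow⟩ := hj v.toNat hvt
    set c := cnt.getD v.toNat 0 with hcdef
    have hgc : PySem.List.pyGet? cnt v = some c := pvPyGetIn cnt v 0 hv0 hvt
    have hgv : PySem.List.pyGet? vis v = some [decide (1 ≤ c), decide (2 ≤ c)] := by
      rw [pvPyGetIn vis v [] hv0 hvtv, hrow]
    have hsetv : ∀ y, PySem.List.pySetD vis v y = vis.set v.toNat y := fun y =>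
      PySem.List.pySetD_of_nonneg vis y hv0
    have hsetc : PySem.List.pySetD cnt v (c + 1) = cnt.set v.toNat (c + 1) :=
      PySem.List.pySetD_of_nonneg cnt (c + 1) hv0
    by_cases h2 : 2 ≤ c
    · -- both slots used: both sides skip v
      have hgv' : PySem.List.pyGet? vis v = some [true, true] := by
        rw [hgv]
        norm_num
        omega
      have hstep : pvVisitA time change t (vis, q) v = (vis, q) := by
        have e0 : PySem.List.pyGet? ([true, true] : List Bool) 0 = some true := by decide
        have e1 : PySem.List.pyGet? ([true, true] : List Bool) 1 = some true := by decide
        simp [pvVisitA, hgv', e0, e1]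
      have hbump : pvBump cnt (v :: r) = pvBump cnt r := by
        simp [pvBump, hgc, show ¬ c < 2 by omega]
      rw [hbump]
      have hres := ih vis cnt q ⟨hlen, hlenc, hj⟩ hrange'
      simpa [pvExpandA, List.foldl_cons, hstep] using hres
    · -- offer accepted: A fills a slot, B bumps the counter
      have hclt : c < 2 := by omega
      have hnewrow :
          (if 1 ≤ c then ([true, true] : List Bool) else [true, false])
            = [decide (1 ≤ c + 1), decide (2 ≤ c + 1)] := by
        by_cases h1 : 1 ≤ c
        · simp [h1, show (1:Int) ≤ c + 1 by omega, show (2:Int) ≤ c + 1 by omega]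
        · simp [h1, show (1:Int) ≤ c + 1 by omega, show ¬ (2:Int) ≤ c + 1 by omega]
      have hstep : pvVisitA time change t (vis, q) v
          = (vis.set v.toNat [decide (1 ≤ c + 1), decide (2 ≤ c + 1)],
             q ++ [(v, pvNextB time change t)]) := by
        by_cases h1 : 1 ≤ c
        · have hgv' : PySem.List.pyGet? vis v = some [true, false] := by
            rw [hgv]
            norm_num [h1]
            omega
          have e0 : PySem.List.pyGet? ([true, false] : List Bool) 0 = some true := by decide
          have e1 : PySem.List.pyGet? ([true, false] : List Bool) 1 = some false := by decide
          have e2 : PySem.List.pySetD ([true, false] : List Bool) 1 true = [true, true] := by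
            decide
          rw [← hnewrow]
          simp [pvVisitA, hgv', e0, e1, e2, hsetv, h1, pvNextB]
        · have hgv' : PySem.List.pyGet? vis v = some [false, false] := by
            rw [hgv]
            norm_num
            omega
          have e0 : PySem.List.pyGet? ([false, false] : List Bool) 0 = some false := by decide
          have e2 : PySem.List.pySetD ([false, false] : List Bool) 0 true = [true, false] := by
            decide
          rw [← hnewrow]
          simp [pvVisitA, hgv', e0, e2, hsetv, h1, pvNextB]
      have hrel' : pvRel nn (vis.set v.toNat [decide (1 ≤ c + 1), decide (2 ≤ c + 1)])
          (cnt.set v.toNat (c + 1)) := by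
        refine ⟨by simpa using hlen, by simpa using hlenc, ?_⟩
        intro j hjlt
        simp only [List.length_set] at hjlt
        rw [pvGetDSet, pvGetDSet]
        by_cases he : v.toNat = j
        · rw [if_pos ⟨he, by omega⟩, if_pos ⟨he, by omega⟩]
          exact ⟨by omega, rfl⟩
        · rw [if_neg (fun hcon => he hcon.1), if_neg (fun hcon => he hcon.1)]
          exact hj j hjlt
      have hbump : pvBump cnt (v :: r)
          = ((pvBump (cnt.set v.toNat (c + 1)) r).1,
             v :: (pvBump (cnt.set v.toNat (c + 1)) r).2) := by
        simp [pvBump, hgc, hclt, hsetc]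
      have hres := ih (vis.set v.toNat [decide (1 ≤ c + 1), decide (2 ≤ c + 1)])
        (cnt.set v.toNat (c + 1)) (q ++ [(v, pvNextB time change t)]) hrel' hrange'
      rw [hbump]
      constructor
      · simpa [pvExpandA, List.foldl_cons, hstep] using hres.1
      · have h2' := hres.2
        simp only [pvExpandA, List.foldl_cons, hstep] at h2' ⊢
        rw [h2']
        simp

-- facts about the (shared) adjacency build
theorem pvMemInsertGetD {d : PySem.Dict Int (List Int)} {a k w : Int} {l : List Int}
    (h : w ∈ (d.insert a l).getD k []) : w ∈ l ∨ w ∈ d.getD k [] := by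
  rw [PySem.Dict.getD_insert] at h
  split_ifs at h
  · exact Or.inl h
  · exact Or.inr h

theorem pvBuildRange (nn : Int) :
    ∀ (edges : List (List Int)),
      (∀ e ∈ edges, ∀ x ∈ e, 0 ≤ x ∧ x ≤ nn) →
      ∀ (g : PySem.Dict Int (List Int)),
        (∀ (k : Int), ∀ w ∈ g.getD k [], 0 ≤ w ∧ w ≤ nn) →
        ∀ (k : Int), ∀ w ∈ (edges.foldl pvAddEdgeA g).getD k [], 0 ≤ w ∧ w ≤ nn := by
  intro edges
  induction edges with
  | nil => intro _ g hg; exact hg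
  | cons e es ih =>
    intro hr g hg
    have hr' : ∀ e' ∈ es, ∀ x ∈ e', 0 ≤ x ∧ x ≤ nn :=
      fun e' he' => hr e' (List.mem_cons_of_mem _ he')
    rw [List.foldl_cons]
    refine ih hr' (pvAddEdgeA g e) ?_
    rcases e with _ | ⟨u, _ | ⟨v, _ | ⟨w0, r3⟩⟩⟩
    · exact hg
    · exact hg
    · -- e = [u, v]
      obtain ⟨hu0, hun⟩ := hr [u, v] List.mem_cons_self u (by simp)
      obtain ⟨hv0, hvn⟩ := hr [u, v] List.mem_cons_self v (by simp)
      intro k w hw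
      simp only [pvAddEdgeA] at hw
      rcases pvMemInsertGetD hw with hw | hw
      · rcases List.mem_append.mp hw with hw | hw
        · rcases pvMemInsertGetD hw with hw | hw
          · rcases List.mem_append.mp hw with hw | hw
            · exact hg _ _ hw
            · simp at hw; omega
          · exact hg _ _ hw
        · simp at hw; omega
      · rcases pvMemInsertGetD hw with hw | hw
        · rcases List.mem_append.mp hw with hw | hw
          · exact hg _ _ hw
          · simp at hw; omega
        · exact hg _ _ hw
    · exact hg

theorem pvBuildNoOne :
    ∀ (edges : List (List Int)),
      (∀ e ∈ edges, ∀ x ∈ e, x ≠ 1) →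
      ∀ (g : PySem.Dict Int (List Int)),
        g.getD 1 [] = [] →
        (edges.foldl pvAddEdgeA g).getD 1 [] = [] := by
  intro edges
  induction edges with
  | nil => intro _ g hg; exact hg
  | cons e es ih =>
    intro hr g hg
    have hr' : ∀ e' ∈ es, ∀ x ∈ e', x ≠ 1 :=
      fun e' he' => hr e' (List.mem_cons_of_mem _ he')
    rw [List.foldl_cons]
    refine ih hr' (pvAddEdgeA g e) ?_
    rcases e with _ | ⟨u, _ | ⟨v, _ | ⟨w0, r3⟩⟩⟩
    · exact hg
    · exact hg
    · have hu1 : u ≠ 1 := hr [u, v] List.mem_cons_self u (by simp)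
      have hv1 : v ≠ 1 := hr [u, v] List.mem_cons_self v (by simp)
      simp only [pvAddEdgeA]
      rw [PySem.Dict.getD_insert, if_neg (fun h => hv1 h.symm),
        PySem.Dict.getD_insert, if_neg (fun h => hu1 h.symm)]
      exact hg
    · exact hg

-- main bisimulation: A's mixed-layer FIFO queue vs B's layered frontier
theorem pvMain (graph : PySem.Dict Int (List Int)) (nn time change : Int)
    (Hrange : ∀ (u : Int), ∀ w ∈ graph.getD u [], 0 ≤ w ∧ w ≤ nn) :
    ∀ (k : Nat) (F N : List Int) (vis : List (List Bool)) (cnt : List Int) (t fa : Int),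
      2 * (2 * pvFreeCnt cnt + F.length + N.length) + (if F = [] then 1 else 0) ≤ k →
      pvRel nn vis cnt →
      pvLoopA graph nn time change vis
          (F.map (fun u => (u, t)) ++ N.map (fun u => (u, pvNextB time change t))) fa
        = (match pvScanB nn t F fa with
           | (some r, _) => r
           | (none, fa') =>
             pvLoopB graph nn time change (pvExpandBFrom graph F cnt N).1
               (pvExpandBFrom graph F cnt N).2 (pvNextB time change t) fa') := by
  intro k
  induction k with
  | zero =>
    intro F N vis cnt t fa hk
    exfalso
    cases F with
    | nil => simp at hk
    | cons u F' =>
      simp only [List.length_cons, if_neg (List.cons_ne_nil u F')] at hk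
      omega
  | succ k ihk =>
    intro F N vis cnt t fa hk hrel
    cases F with
    | nil =>
      change pvLoopA graph nn time change vis
          (List.map (fun u => (u, t)) [] ++ N.map (fun u => (u, pvNextB time change t))) fa
        = pvLoopB graph nn time change cnt N (pvNextB time change t) fa
      rw [List.map_nil, List.nil_append]
      cases N with
      | nil =>
        rw [pvLoopB_nil]
        simpa using pvLoopA_nil graph nn time change vis fa
      | cons w N' =>
        have hres := ihk (w :: N') [] vis cnt (pvNextB time change t) fa
          (by
            simp at hk ⊢
            omega)
          hrel
        simp only [List.map_nil, List.append_nil] at hres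
        rw [hres, pvLoopB_cons]
        rfl
    | cons u F' =>
      have hnbrange : ∀ w ∈ graph.getD u [], 0 ≤ w ∧ w ≤ nn := Hrange u
      simp only [List.map_cons, List.cons_append]
      rw [pvLoopA_cons]
      by_cases hret : u = nn ∧ fa ≠ -1 ∧ t > fa
      · rw [if_pos hret]
        have hsc : pvScanB nn t (u :: F') fa = (some t, fa) := by
          obtain ⟨h1, h2, h3⟩ := hret
          simp only [pvScanB, List.foldl_cons]
          rw [show pvScanStep nn t (none, fa) u = (some t, fa) by
            simp [pvScanStep, h1, h2, h3]]
          exact pvScan_absorb nn t F' t fa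
        rw [hsc]
      · rw [if_neg hret]
        have hsc : pvScanB nn t (u :: F') fa
            = pvScanB nn t F' (if u = nn ∧ fa = -1 then t else fa) := by
          simp only [pvScanB, List.foldl_cons]
          congr 1
          by_cases h1 : u = nn
          · by_cases h2 : fa = -1
            · simp [pvScanStep, h1, h2]
            · have h3 : ¬ t > fa := fun hgt => hret ⟨h1, h2, hgt⟩
              simp [pvScanStep, h1, h2, h3]
          · simp [pvScanStep, h1]
        obtain ⟨hrel', hq⟩ := pvExpandA_eq_bump nn time change t (graph.getD u []) vis cnt
          (F'.map (fun u => (u, t)) ++ N.map (fun u => (u, pvNextB time change t)))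
          hrel hnbrange
        have hVisit : pvVisitB graph (cnt, N) u
            = ((pvBump cnt (graph.getD u [])).1, N ++ (pvBump cnt (graph.getD u [])).2) := by
          unfold pvVisitB
          exact pvStepB_fold_eq_bump (graph.getD u []) cnt N
        have hmeas := pvBump_measure (graph.getD u []) cnt
        have hflag : (if F' = ([] : List Int) then (1 : Nat) else 0) ≤ 1 := by
          split <;> omega
        have hres := ihk F' (N ++ (pvBump cnt (graph.getD u [])).2)
          (pvExpandA time change t (graph.getD u []) vis
            (F'.map (fun u => (u, t)) ++ N.map (fun u => (u, pvNextB time change t)))).1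
          (pvBump cnt (graph.getD u [])).1 t (if u = nn ∧ fa = -1 then t else fa)
          (by
            simp only [List.length_cons, if_neg (List.cons_ne_nil u F')] at hk
            simp only [List.length_append]
            omega)
          hrel'
        have hq2 : (pvExpandA time change t (graph.getD u []) vis
              (F'.map (fun u => (u, t)) ++ N.map (fun u => (u, pvNextB time change t)))).2
            = F'.map (fun u => (u, t))
              ++ (N ++ (pvBump cnt (graph.getD u [])).2).map
                  (fun u => (u, pvNextB time change t)) := by
          rw [hq, List.map_append, List.append_assoc]
        rw [hq2, hres, hsc]
        have hstep2 : pvExpandBFrom graph (u :: F') cnt N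
            = pvExpandBFrom graph F' (pvBump cnt (graph.getD u [])).1
                (N ++ (pvBump cnt (graph.getD u [])).2) := by
          simp only [pvExpandBFrom, List.foldl_cons, hVisit]
        rw [hstep2]

theorem pvInitRel (n : Int) (hn : 1 ≤ n) :
    pvRel n ((List.replicate (n + 1).toNat (List.replicate 2 false)).set 1 [true, false])
      ((List.replicate (n + 1).toNat (0 : Int)).set 1 1) := by
  refine ⟨by simp, by simp, ?_⟩
  intro j hj
  simp only [List.length_set, List.length_replicate] at hj
  rw [pvGetDSet, pvGetDSet]
  by_cases he : 1 = j
  · rw [if_pos ⟨he, by simpa using hj⟩, if_pos ⟨he, by simpa using hj⟩]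
    norm_num
  · rw [if_neg (fun hcon => he hcon.1), if_neg (fun hcon => he hcon.1)]
    rw [List.getD_eq_getElem _ 0 (by simpa using hj),
      List.getD_eq_getElem _ [] (by simpa using hj)]
    simp

-- ===== VERDICT (by name: the statement is the Claim_ definition above) =====
theorem secondMinimum2_spec : Claim_equal_secondMinimum2 := by
  unfold Claim_equal_secondMinimum2
  intro n edges time change _ hpre
  obtain ⟨hn, _, _, hlab⟩ := hpre
  unfold Spec_secondMinimum2 secondMinimum2 secondMinimum2_alt
  have h1L : (1 : Int).toNat < (List.replicate (n + 1).toNat (List.replicate 2 false)).length := by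
    simp
    omega
  have hvg : PySem.List.pyGet? (List.replicate (n + 1).toNat (List.replicate 2 false)) 1
      = some (List.replicate 2 false) := by
    rw [pvPyGetIn _ 1 [] (by norm_num) h1L, List.getD_eq_getElem _ [] h1L]
    simp
  have hrow0 : PySem.List.pySetD (List.replicate 2 false) 0 true = [true, false] := by decide
  have hset1 : PySem.List.pySetD (List.replicate (n + 1).toNat (List.replicate 2 false)) 1
        [true, false]
      = (List.replicate (n + 1).toNat (List.replicate 2 false)).set 1 [true, false] :=
    PySem.List.pySetD_of_nonneg _ _ (by norm_num)
  have hsetc1 : PySem.List.pySetD (List.replicate (n + 1).toNat (0 : Int)) 1 1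
      = (List.replicate (n + 1).toNat (0 : Int)).set 1 1 :=
    PySem.List.pySetD_of_nonneg _ _ (by norm_num)
  simp only [hvg, hrow0, hset1, hsetc1]
  rcases hlab with hlab | hlab
  · -- all labels in 0..n: the layered bisimulation
    have Hrange : ∀ (u : Int), ∀ w ∈ (pvBuildGraphA edges).getD u [], 0 ≤ w ∧ w ≤ n := by
      refine pvBuildRange n edges hlab PySem.Dict.empty ?_
      intro k w hw
      simp at hw
    have hmain := pvMain (pvBuildGraphA edges) n time change Hrange
      (2 * (2 * pvFreeCnt ((List.replicate (n + 1).toNat (0 : Int)).set 1 1) + 1 + 0))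
      [1] [] ((List.replicate (n + 1).toNat (List.replicate 2 false)).set 1 [true, false])
      ((List.replicate (n + 1).toNat (0 : Int)).set 1 1) 0 (-1)
      (by simp) (pvInitRel n hn)
    simp only [List.map_cons, List.map_nil, List.append_nil] at hmain
    rw [hmain, pvLoopB_cons]
    rfl
  · -- node 1 is never mentioned: both searches stop at once and return -1
    have h10 : (pvBuildGraphA edges).getD 1 [] = [] := by
      refine pvBuildNoOne edges hlab PySem.Dict.empty ?_
      simp
    rw [pvLoopA_cons, if_neg (by simp), h10]
    have hexpA : pvExpandA time change 0 ([] : List Int)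
        ((List.replicate (n + 1).toNat (List.replicate 2 false)).set 1 [true, false]) []
        = (((List.replicate (n + 1).toNat (List.replicate 2 false)).set 1 [true, false]),
           []) := rfl
    rw [hexpA]
    rw [pvLoopA_nil, pvLoopB_cons]
    have hscan : pvScanB n 0 [1] (-1) = (none, if (1 : Int) = n then 0 else -1) := by
      by_cases h : (1 : Int) = n <;> simp [pvScanB, pvScanStep, h]
    rw [hscan]
    have hexpB : pvExpandB (pvBuildGraphA edges) [1]
        ((List.replicate (n + 1).toNat (0 : Int)).set 1 1)
        = (((List.replicate (n + 1).toNat (0 : Int)).set 1 1), []) := by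
      simp [pvExpandB, pvVisitB, h10]
    simp only [hexpB]
    rw [pvLoopB_nil]
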